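-- pv_equiv track=rewrite | github.com/Awingo/Wimpout | whimp_out.py | extra_points
-- ===== SOURCE A (Python) =====
-- def get_dice(dice, x):
--     """
--     Input: a random list of integers that are the rolled dice
--     Output: the value of a die at a given index
--     :param dice: a list of the dice
--     :param x: an index for where to get the value from
--     :return:
--     """
--     return dice[x-1]
--
-- def extra_points(dice):
--     """
--     Input: a random list of integers that are the rolled dice
--     Output: add 10 points for a die that's value is 1 and 5 points for a die that's value is 5
--     :param dice: a list of the dice
--     :return: points
--     """
--     points = 0
--     for x in range(len(dice)):
--         if get_dice(dice, x) == 5: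
--             points += 5
--         if get_dice(dice, x) == 1:
--             points += 10
--     return points
-- ===== SOURCE B (Python) =====
-- def extra_points(dice):
--     return dice.count(5) * 5 + dice.count(1) * 10
-- ===== Notes on version B (the rewrite author's own statement) =====
-- stated objective: idiomatic
-- what changed: Replaces the index loop (with its dice[x-1] rotated traversal via get_dice and a running accumulator) by two count() tallies combined arithmetically, dropping get_dice entirely.
import Mathlib
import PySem

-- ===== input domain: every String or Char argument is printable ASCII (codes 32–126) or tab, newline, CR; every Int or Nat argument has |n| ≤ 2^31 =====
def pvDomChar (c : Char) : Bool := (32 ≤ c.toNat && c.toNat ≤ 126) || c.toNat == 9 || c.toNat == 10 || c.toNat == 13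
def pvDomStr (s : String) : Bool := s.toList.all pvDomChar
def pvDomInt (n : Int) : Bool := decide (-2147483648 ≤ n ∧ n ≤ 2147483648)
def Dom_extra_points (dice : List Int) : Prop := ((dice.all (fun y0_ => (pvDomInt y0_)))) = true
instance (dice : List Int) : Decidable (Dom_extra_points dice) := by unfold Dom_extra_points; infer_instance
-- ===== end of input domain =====

-- B replaces A's index loop (which reads dice[x-1], i.e. starts at the last die) by two count() tallies; idiomatic, same O(n).

-- ===== PORT A =====
-- get_dice(dice, x) = dice[x-1]; inside extra_points the index x-1 is always in range
-- (x ∈ range(len(dice)), so the loop only runs on nonempty dice), hence pyGetD is exact here.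
def get_dice (dice : List Int) (x : Int) : Int :=
  PySem.List.pyGetD dice (x - 1) 0

def extra_points (dice : List Int) : Int :=
  (PySem.List.pyRange 0 (PySem.List.len dice) 1).foldl
    (fun points x =>
      let points := if get_dice dice x = 5 then points + 5 else points
      if get_dice dice x = 1 then points + 10 else points)
    0

-- ===== PORT B =====
def extra_points_alt (dice : List Int) : Int :=
  (PySem.List.count dice 5 : Int) * 5 + (PySem.List.count dice 1 : Int) * 10

-- ===== PRECONDITION & SPEC =====
def Spec_extra_points (dice : List Int) (out : Int) : Prop := out = extra_points_alt dice
instance (dice : List Int) (out : Int) : Decidable (Spec_extra_points dice out) := by unfold Spec_extra_points; infer_instance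

-- ===== CLAIM (what is proved, stated in full; the proofs are below) =====
def Claim_equal_extra_points : Prop := ∀ (dice : List Int), Dom_extra_points dice → Spec_extra_points dice (extra_points dice)

-- ===== LEMMAS AND PROOFS =====

-- per-die score
def pvScore (v : Int) : Int := (if v = 5 then 5 else 0) + (if v = 1 then 10 else 0)

-- A's loop body is 'acc + pvScore (f x)', so the fold is an initial value plus a mapped sum
theorem pvFoldA (f : Int → Int) (l : List Int) (init : Int) :
    l.foldl (fun points x =>
      let points := if f x = 5 then points + 5 else points
      if f x = 1 then points + 10 else points) init
      = init + (l.map (fun x => pvScore (f x))).sum := by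
  induction l generalizing init with
  | nil => simp
  | cons y ys ih =>
      simp only [List.foldl_cons, List.map_cons, List.sum_cons, ih]
      unfold pvScore
      split_ifs <;> ring

theorem pvRangeMapGetD {α : Type} (xs : List α) (d : α) (m : Nat) (hm : m ≤ xs.length) :
    (List.range m).map (fun k => xs.getD k d) = xs.take m := by
  apply List.ext_getElem
  · simp [hm]
  · intro k h1 h2
    simp only [List.length_map, List.length_range] at h1
    simp only [List.getElem_map, List.getElem_range, List.getElem_take]
    rw [List.getD_eq_getElem xs d (by omega : k < xs.length)]

theorem pvSumCount (l : List Int) :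
    (l.map pvScore).sum = (l.count 5 : Int) * 5 + (l.count 1 : Int) * 10 := by
  induction l with
  | nil => simp
  | cons y ys ih =>
      simp only [List.map_cons, List.sum_cons, ih, List.count_cons]
      unfold pvScore
      by_cases h5 : y = 5 <;> by_cases h1 : y = 1 <;>
        simp [h5, h1] <;> omega

-- ===== VERDICT (by name: the statement is the Claim_ definition above) =====
theorem extra_points_spec : Claim_equal_extra_points := by
  intro dice _
  unfold Spec_extra_points extra_points extra_points_alt get_dice
  rw [pvFoldA (fun x => PySem.List.pyGetD dice (x - 1) 0) _ 0]
  rw [PySem.List.count_eq, PySem.List.count_eq]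
  rcases eq_or_ne dice [] with rfl | hne
  · simp
  · have hpos : 0 < (PySem.List.len dice) := by
      simp [PySem.List.len_eq]
      exact List.length_pos_iff.mpr hne
    rw [PySem.List.pyRange_one_cons hpos]
    simp only [zero_add, List.map_cons]
    have htail : (PySem.List.pyRange 1 (PySem.List.len dice) 1).map
        (fun x => pvScore (PySem.List.pyGetD dice (x - 1) 0))
        = (dice.dropLast.map pvScore) := by
      rw [PySem.List.pyRange_one, List.map_map]
      have : ((fun x => pvScore (PySem.List.pyGetD dice (x - 1) 0)) ∘ fun k : Nat => (1 : Int) + ↑k)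
          = fun k : Nat => pvScore (dice.getD k 0) := by
        funext k
        simp [Function.comp, add_sub_cancel_left, PySem.List.pyGetD_natCast]
      rw [this, show (fun k : Nat => pvScore (dice.getD k 0))
            = pvScore ∘ (fun k : Nat => dice.getD k 0) from rfl, ← List.map_map]
      have hm : (PySem.List.len dice - 1).toNat ≤ dice.length := by
        simp only [PySem.List.len_eq]; omega
      have hlen : (PySem.List.len dice - 1).toNat = dice.length - 1 := by
        simp only [PySem.List.len_eq]; omega
      rw [pvRangeMapGetD dice 0 _ hm, List.dropLast_eq_take, hlen]
    rw [htail]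
    have hhead : PySem.List.pyGetD dice ((0 : Int) - 1) 0 = dice.getLast hne := by
      have := PySem.List.pyGetD_neg_one (xs := dice) (d := 0) hne
      simpa using this
    rw [hhead]
    conv_rhs => rw [← List.dropLast_append_getLast hne, ← pvSumCount]
    simp [List.map_append]
    ring
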